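-- pv_equiv track=rewrite | github.com/mikeiacovacci/axiom-framework | lib/functions.py | get_input_types
-- ===== SOURCE A (Python) =====
-- def get_input_types(input_types_list, text):
--     """ SUMMARY:  parses placeholder text to determine the type of input required for command/action execution
--           INPUT:  1) list of all possible input types (strings), and 2) the command text (list or str)
--          OUTPUT:  a list of strings """
--
--     if isinstance(text, list):
--         temporary_string = ""
--         line_count = 0
--         while line_count < text.__len__():
--             temporary_string += text[line_count]
--             line_count += 1
--         text = temporary_string
--
--     used_input_types = []
--     end = text.__len__()
--     indices = [i for i in range(end) if text.startswith("{", i)]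
--     hit_count = 0
--
--     while hit_count < indices.__len__():
--         min_beginning = indices[hit_count]
--         if min_beginning + 10 > end:
--             max_ending = end
--         else:
--             max_ending = min_beginning + 10
--
--         target = text[min_beginning:max_ending]
--
--         for entry in input_types_list:
--             if str(entry + "}") in target:
--                 used_input_types.append(entry)
--                 break
--
--         hit_count += 1
--
--     return used_input_types
-- ===== SOURCE B (Python) =====
-- def get_input_types(input_types_list, text):
--     """Same result as A by a different route: a dict from entry+'}' to its first
--     list index; each 10-char window after a '{' yields boundedly many substrings
--     ending at a '}', and the minimum dict index among them is the entry A's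
--     per-window scan over the whole entry list would pick."""
--     if isinstance(text, list):
--         text = "".join(text)
--
--     index_of = {}
--     for pos, entry in enumerate(input_types_list):
--         key = entry + "}"
--         if key not in index_of:
--             index_of[key] = pos
--
--     used_input_types = []
--     for i in range(len(text)):
--         if text[i] != "{":
--             continue
--         window = text[i:i + 10]
--         best = None
--         for j in range(len(window)):
--             if window[j] != "}":
--                 continue
--             for k in range(j + 1):
--                 pos = index_of.get(window[k:j + 1])
--                 if pos is not None and (best is None or pos < best):
--                     best = pos
--         if best is not None:
--             used_input_types.append(input_types_list[best])
--     return used_input_types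
-- ===== Notes on version B (the rewrite author's own statement) =====
-- stated objective: alternative
-- what changed: Instead of scanning every entry of input_types_list against each 10-char window, B builds once a dict from entry+'}' to its first list index and, per window, looks up the boundedly many substrings ending at a '}', keeping the minimum index.
import Mathlib
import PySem

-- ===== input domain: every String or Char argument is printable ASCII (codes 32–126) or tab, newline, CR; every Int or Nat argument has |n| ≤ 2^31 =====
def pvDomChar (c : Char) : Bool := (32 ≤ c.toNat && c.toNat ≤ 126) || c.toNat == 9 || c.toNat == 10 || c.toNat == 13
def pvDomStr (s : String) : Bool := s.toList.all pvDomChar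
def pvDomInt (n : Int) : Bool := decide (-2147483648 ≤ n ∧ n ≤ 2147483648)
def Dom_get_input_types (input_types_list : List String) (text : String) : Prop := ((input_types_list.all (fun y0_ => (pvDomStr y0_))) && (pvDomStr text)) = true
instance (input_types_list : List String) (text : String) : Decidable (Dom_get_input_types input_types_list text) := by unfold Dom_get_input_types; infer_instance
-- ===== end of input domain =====

-- B replaces A's per-window scan over the whole input-type list by a dict from entry+"}" to
-- its first list index, looking up the boundedly many candidate substrings of each 10-char
-- window and keeping the minimum index (objective: alternative algorithm, same result by a
-- structurally different route).
-- Under the type convention `text` is a str, so A's dead `isinstance(text, list)` join branch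
-- (and Source B's mirror of it) has no Lean counterpart.

-- ===== PORT A =====
-- `text.startswith("{", i)` (0 ≤ i) is ported exactly as: ["{"] is a prefix of text[i:].
def get_input_types (input_types_list : List String) (text : String) : List String :=
  let cs := text.toList
  let endLen : Int := cs.length
  let indices := (PySem.List.pyRange 0 endLen 1).filter
      (fun i => PySem.Chars.startswith (PySem.List.slice cs (some i) none) ['{'])
  indices.foldl
    (fun used min_beginning =>
      let max_ending : Int := if min_beginning + 10 > endLen then endLen else min_beginning + 10
      let target := PySem.List.slice cs (some min_beginning) (some max_ending)
      -- for-entry loop with break = first entry whose entry+"}" occurs in target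
      match input_types_list.find? (fun entry => PySem.Chars.isIn (entry.toList ++ ['}']) target) with
      | some entry => used ++ [entry]
      | none => used)
    []

-- ===== PORT B =====
-- the key stored for an entry (Source B's `entry + "}"`)
def altKey (e : String) : List Char := e.toList ++ ['}']

-- Source B's dict build: `for pos, entry in enumerate(...)`, insert key only if absent (first index wins)
def altBuild (entries : List String) (pos : Nat) (d : PySem.Dict (List Char) Nat) :
    PySem.Dict (List Char) Nat :=
  match entries with
  | [] => d
  | entry :: rest =>
      let key := altKey entry
      altBuild rest (pos + 1) (if (d.get? key).isSome then d else d.insert key pos)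

-- Source B's `best`-update: min of the looked-up position and the current best (None = no hit yet)
def altStep (index_of : PySem.Dict (List Char) Nat) (best : Option Nat) (t : List Char) :
    Option Nat :=
  match index_of.get? t with
  | some pos =>
      match best with
      | none => some pos
      | some b => if pos < b then some pos else some b
  | none => best

def get_input_types_alt (input_types_list : List String) (text : String) : List String :=
  let index_of := altBuild input_types_list 0 PySem.Dict.empty
  let cs := text.toList
  (List.range cs.length).foldl
    (fun used i =>
      if cs[i]? ≠ some '{' then used
      else
        let window := (cs.drop i).take 10
        let best := (List.range window.length).foldl
          (fun best j =>
            if window[j]? ≠ some '}' then best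
            else (List.range (j + 1)).foldl
              (fun best k => altStep index_of best ((window.drop k).take (j + 1 - k)))
              best)
          none
        match best with
        | some b =>
            match input_types_list[b]? with   -- always a hit: b is a valid index from the dict
            | some entry => used ++ [entry]
            | none => used
        | none => used)
    []

-- ===== PRECONDITION & SPEC =====
def Spec_get_input_types (input_types_list : List String) (text : String) (out : List String) : Prop := out = get_input_types_alt input_types_list text
instance (input_types_list : List String) (text : String) (out : List String) : Decidable (Spec_get_input_types input_types_list text out) := by unfold Spec_get_input_types; infer_instance

-- ===== CLAIM (what is proved, stated in full; the proofs are below) =====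
def Claim_equal_get_input_types : Prop := ∀ (input_types_list : List String) (text : String), Dom_get_input_types input_types_list text → Spec_get_input_types input_types_list text (get_input_types input_types_list text)

-- ===== LEMMAS AND PROOFS =====

-- option-min on Nat indices (first/least index wins)
def omin : Option Nat → Option Nat → Option Nat
  | none, b => b
  | some a, none => some a
  | some a, some b => some (min a b)

theorem omin_assoc (a b c : Option Nat) : omin (omin a b) c = omin a (omin b c) := by
  cases a <;> cases b <;> cases c <;> simp [omin, Nat.min_assoc]

theorem omin_none_right (a : Option Nat) : omin a none = a := by cases a <;> rfl

-- altStep is omin with the lookup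
theorem altStep_eq (d : PySem.Dict (List Char) Nat) (best : Option Nat) (t : List Char) :
    altStep d best t = omin best (d.get? t) := by
  unfold altStep
  cases h : d.get? t with
  | none => cases best <;> simp [omin]
  | some pos =>
      cases best with
      | none => simp [omin]
      | some b =>
          simp only [omin, Nat.min_def]
          split_ifs <;> simp <;> omega

-- lookup in the dict built by altBuild = first index (offset by pos) whose key matches
theorem altBuild_get? (entries : List String) (pos : Nat) (d : PySem.Dict (List Char) Nat)
    (t : List Char) :
    (altBuild entries pos d).get? t =
      ((d.get? t).orElse (fun _ =>
        (entries.findIdx? (fun e => altKey e == t)).map (· + pos))) := by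
  induction entries generalizing pos d with
  | nil => cases h : d.get? t <;> simp [altBuild, h, Option.orElse]
  | cons e rest ih =>
      simp only [altBuild, ih]
      by_cases hk : altKey e = t
      · subst hk
        cases hd : d.get? (altKey e) with
        | some v => simp [hd, Option.orElse]
        | none =>
            simp [Option.orElse, List.findIdx?_cons, PySem.Dict.get?_insert_self]
      · have hpred : (altKey e == t) = false := by simpa using hk
        have hgoal : ∀ d' : PySem.Dict (List Char) Nat, d'.get? t = d.get? t →
            ((d'.get? t).orElse (fun _ =>
              (rest.findIdx? (fun e => altKey e == t)).map (· + (pos + 1)))) =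
            ((d.get? t).orElse (fun _ =>
              (((e :: rest).findIdx? (fun e => altKey e == t))).map (· + pos))) := by
          intro d' hd'
          rw [hd', List.findIdx?_cons, hpred]
          cases hd : d.get? t with
          | some v => simp [Option.orElse]
          | none =>
              cases hr : rest.findIdx? (fun e => altKey e == t) with
              | none => simp [Option.orElse]
              | some i => simp [Option.orElse]; omega
        cases hd2 : d.get? (altKey e) with
        | some v => simp only [Option.isSome_some, if_pos rfl]; exact hgoal d rfl
        | none =>
            simp only [Option.isSome_none, Bool.false_eq_true, if_false]
            exact hgoal _ (PySem.Dict.get?_insert_of_ne _ _ (fun h => hk h.symm))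

-- findIdx? of a disjunction = omin of the two findIdx?
theorem findIdx?_or (L : List String) (p q : String → Bool) :
    L.findIdx? (fun e => p e || q e) = omin (L.findIdx? p) (L.findIdx? q) := by
  induction L with
  | nil => rfl
  | cons e rest ih =>
      by_cases hp : p e <;> by_cases hq : q e <;>
        simp [List.findIdx?_cons, hp, hq, ih, omin] <;>
        cases rest.findIdx? p <;> cases rest.findIdx? q <;> simp

-- folding omin over lookups of a candidate list = findIdx? of "my key is one of the candidates"
theorem fold_omin_eq_findIdx? (L : List String) (ts : List (List Char)) :
    ts.foldr (fun t acc => omin ((altBuild L 0 PySem.Dict.empty).get? t) acc) none =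
      L.findIdx? (fun e => decide (altKey e ∈ ts)) := by
  induction ts with
  | nil =>
      simp only [List.foldr_nil, List.not_mem_nil, decide_false]
      symm
      rw [List.findIdx?_eq_none_iff]
      intro x _
      rfl
  | cons t rest ih =>
      have hget : ∀ t, (altBuild L 0 PySem.Dict.empty).get? t =
          L.findIdx? (fun e => altKey e == t) := by
        intro t
        rw [altBuild_get? L 0 PySem.Dict.empty t]
        simp [PySem.Dict.empty, PySem.Dict.get?, Option.orElse]
      rw [List.foldr_cons, ih, hget, ← findIdx?_or]
      congr 1
      funext e
      by_cases h : altKey e = t <;> simp [List.mem_cons, h]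

-- foldl with omin-steps = omin of start and foldr
theorem foldl_omin (f : List Char → Option Nat) (ts : List (List Char)) (b : Option Nat) :
    ts.foldl (fun best t => omin best (f t)) b =
      omin b (ts.foldr (fun t acc => omin (f t) acc) none) := by
  induction ts generalizing b with
  | nil => simp [omin_none_right]
  | cons t rest ih => simp [List.foldl_cons, ih, omin_assoc]

-- candidate list of a window: all substrings ending at a '}'
def cands (w : List Char) : List (List Char) :=
  (List.range w.length).flatMap
    (fun j => if w[j]? = some '}' then (List.range (j + 1)).map
        (fun k => (w.drop k).take (j + 1 - k)) else [])

-- foldl over a flatMap = nested foldl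
theorem foldl_flatMap' {a b s : Type} (js : List a) (f : a → List b) (g : s → b → s) (b0 : s) :
    (js.flatMap f).foldl g b0 = js.foldl (fun acc j => (f j).foldl g acc) b0 := by
  induction js generalizing b0 with
  | nil => rfl
  | cons j rest ih => simp [List.flatMap_cons, List.foldl_append, ih]

-- membership in cands ↔ infix, for a key (nonempty, ends in '}')
theorem key_mem_cands_iff (e : String) (w : List Char) :
    altKey e ∈ cands w ↔ altKey e <:+: w := by
  unfold cands altKey
  constructor
  · intro h
    rcases List.mem_flatMap.mp h with ⟨j, _, ht⟩
    by_cases hg : w[j]? = some '}'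
    · rw [if_pos hg] at ht
      rcases List.mem_map.mp ht with ⟨k, _, heq⟩
      rw [← heq]
      exact ((List.take_prefix _ _).isInfix).trans ((List.drop_suffix _ _).isInfix)
    · rw [if_neg hg] at ht
      simp at ht
  · intro h
    rcases h with ⟨u, v, huv⟩
    have hlen : w.length = u.length + (e.toList.length + 1) + v.length := by
      subst huv; simp; omega
    have hdrop : w.drop u.length = (e.toList ++ ['}']) ++ v := by
      subst huv
      rw [List.append_assoc, List.drop_left]
    have hj : u.length + e.toList.length < w.length := by omega
    have hget : w[u.length + e.toList.length]? = some '}' := by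
      rw [← List.getElem?_drop, hdrop]
      rw [List.getElem?_append_left (by simp)]
      exact List.getElem?_concat_length
    refine List.mem_flatMap.mpr ⟨u.length + e.toList.length, List.mem_range.mpr hj, ?_⟩
    rw [if_pos hget]
    refine List.mem_map.mpr ⟨u.length, List.mem_range.mpr (by omega), ?_⟩
    rw [hdrop]
    have : u.length + e.toList.length + 1 - u.length = (e.toList ++ ['}']).length := by
      simp; omega
    rw [this, List.take_left]

-- B's nested j/k fold = foldl over the flat candidate list
theorem nested_fold_eq (d : PySem.Dict (List Char) Nat) (w : List Char) :
    (List.range w.length).foldl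
      (fun best j =>
        if w[j]? ≠ some '}' then best
        else (List.range (j + 1)).foldl
          (fun best k => altStep d best ((w.drop k).take (j + 1 - k))) best)
      none =
    (cands w).foldl (fun best t => altStep d best t) none := by
  rw [cands, foldl_flatMap']
  have hstep : (fun (best : Option Nat) (j : Nat) =>
        if w[j]? ≠ some '}' then best
        else (List.range (j + 1)).foldl
          (fun best k => altStep d best ((w.drop k).take (j + 1 - k))) best) =
      (fun (best : Option Nat) (j : Nat) =>
        ((if w[j]? = some '}' then (List.range (j + 1)).map
            (fun k => (w.drop k).take (j + 1 - k)) else []).foldl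
          (fun best t => altStep d best t) best)) := by
    funext best j
    by_cases hg : w[j]? = some '}' <;> simp [hg, List.foldl_map]
  rw [hstep]

-- A's per-window result = B's per-window result
theorem window_eq (L : List String) (w : List Char) (used : List String) :
    (match L.find? (fun entry => PySem.Chars.isIn (entry.toList ++ ['}']) w) with
      | some entry => used ++ [entry]
      | none => used) =
    (match (List.range w.length).foldl
        (fun best j =>
          if w[j]? ≠ some '}' then best
          else (List.range (j + 1)).foldl
            (fun best k => altStep (altBuild L 0 PySem.Dict.empty) best ((w.drop k).take (j + 1 - k)))
            best)
        none with
      | some b => (match L[b]? with | some entry => used ++ [entry] | none => used)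
      | none => used) := by
  have hbest : (List.range w.length).foldl
        (fun best j =>
          if w[j]? ≠ some '}' then best
          else (List.range (j + 1)).foldl
            (fun best k => altStep (altBuild L 0 PySem.Dict.empty) best ((w.drop k).take (j + 1 - k)))
            best)
        none =
      L.findIdx? (fun entry => PySem.Chars.isIn (entry.toList ++ ['}']) w) := by
    rw [nested_fold_eq]
    have h1 : (cands w).foldl
        (fun best t => altStep (altBuild L 0 PySem.Dict.empty) best t) none =
        (cands w).foldl
        (fun best t => omin best ((altBuild L 0 PySem.Dict.empty).get? t)) none := by
      simp only [altStep_eq]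
    rw [h1, foldl_omin, fold_omin_eq_findIdx?]
    show L.findIdx? _ = _
    congr 1
    funext e
    rw [Bool.eq_iff_iff, decide_eq_true_iff, key_mem_cands_iff,
      PySem.Chars.isIn_iff_infix]
    exact Iff.rfl
  rw [hbest, List.find?_eq_bind_findIdx?_getElem?]
  cases h : L.findIdx? (fun entry => PySem.Chars.isIn (entry.toList ++ ['}']) w) with
  | none => rfl
  | some b => simp only [Option.bind_some]

-- startswith("{", i): prefix test = head test
theorem startswith_brace (l : List Char) :
    PySem.Chars.startswith l ['{'] = true ↔ l[0]? = some '{' := by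
  rw [PySem.Chars.startswith_iff]
  cases l with
  | nil => simp
  | cons a t => simp [List.cons_prefix_cons, eq_comm]

-- A's sliced target is the same 10-char window B takes
theorem target_eq (cs : List Char) (i : Nat) :
    PySem.List.slice cs (some (i : Int))
        (some (if (i : Int) + 10 > (cs.length : Int) then (cs.length : Int) else (i : Int) + 10)) =
      (cs.drop i).take 10 := by
  by_cases h : (i : Int) + 10 > (cs.length : Int)
  · rw [if_pos h]
    have : ((cs.length : Nat) : Int) = (cs.length : Int) := rfl
    rw [← this, PySem.List.slice_natCast]
    rw [List.take_of_length_le (by simp), List.take_of_length_le (by simp; omega)]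
  · rw [if_neg h]
    have h10 : (i : Int) + 10 = ((i + 10 : Nat) : Int) := by push_cast; ring
    rw [h10, PySem.List.slice_natCast]
    congr 1
    omega

-- ===== VERDICT (by name: the statement is the Claim_ definition above) =====
theorem get_input_types_spec : Claim_equal_get_input_types := by
  intro L text _
  simp only [Spec_get_input_types, get_input_types, get_input_types_alt]
  rw [PySem.List.pyRange_zero_natCast, List.filter_map, List.foldl_map, List.foldl_filter]
  apply PySem.List.foldl_congr_mem
  intro used i hi
  simp only [Function.comp_apply]
  by_cases hg : text.toList[i]? = some '{'
  · have hsw : PySem.Chars.startswith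
        (PySem.List.slice text.toList (some (i : Int)) none) ['{'] = true := by
      rw [PySem.List.slice_from_natCast, startswith_brace, List.getElem?_drop]
      simpa using hg
    rw [if_pos hsw, target_eq, if_neg (by simp [hg])]
    exact window_eq L ((text.toList.drop i).take 10) used
  · rw [if_neg ?_, if_pos (by simp [hg])]
    rw [PySem.List.slice_from_natCast, startswith_brace, List.getElem?_drop]
    simpa using hg
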